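-- pv_equiv track=rewrite | github.com/Tipto-Ghosh/Leetcode-Daily-Challenge | November2025/day_08.py | minimumOneBitOperations
-- ===== SOURCE A (Python) =====
-- def minimumOneBitOperations(n: int) -> int:
--     ans = 0
--     k = 0
--     mask = 1
--
--     while mask <= n:
--         if n & mask:
--             ans = 2 ** (k + 1) -1 - ans
--
--         k += 1
--         mask <<= 1
--
--     return ans
-- ===== SOURCE B (Python) =====
-- def minimumOneBitOperations(n: int) -> int:
--     # Inverse Gray code as an XOR fold: ans is the XOR of all right-shifted copies of n
--     ans = 0
--     while n > 0:
--         ans ^= n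
--         n >>= 1
--     return ans
-- ===== Notes on version B (the rewrite author's own statement) =====
-- stated objective: idiomatic
-- what changed: Replaces A's bit-by-bit loop with an explicit bit index, mask and positional complement-subtraction on each set bit by the standard inverse-Gray-code XOR fold that XOR-accumulates progressively right-shifted copies of n.
import Mathlib
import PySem

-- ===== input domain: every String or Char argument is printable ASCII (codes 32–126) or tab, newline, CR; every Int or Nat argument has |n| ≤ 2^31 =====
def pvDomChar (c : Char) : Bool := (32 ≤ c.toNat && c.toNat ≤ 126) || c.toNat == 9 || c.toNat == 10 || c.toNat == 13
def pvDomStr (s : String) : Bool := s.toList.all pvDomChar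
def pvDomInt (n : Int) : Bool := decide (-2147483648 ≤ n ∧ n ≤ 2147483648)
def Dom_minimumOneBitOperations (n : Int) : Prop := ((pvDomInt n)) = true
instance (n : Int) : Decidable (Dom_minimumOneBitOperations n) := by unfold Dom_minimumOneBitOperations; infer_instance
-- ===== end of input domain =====

-- B replaces A's positional complement-subtraction loop by the inverse-Gray-code XOR fold; A and B are proved equal on all Int inputs.

-- ===== PORT A =====
-- A's 'while mask <= n' loop; the invariant mask = 2^k is folded into the
-- parameter k (Python's 'mask <<= 1' becomes k+1, 'mask' is written 2^k).
def pvALoop (n : Int) (ans : Int) (k : Nat) : Int :=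
  if _h : (2:Int) ^ k ≤ n then
    pvALoop n (if PySem.Int.band n ((2:Int) ^ k) ≠ 0 then 2 ^ (k + 1) - 1 - ans else ans) (k + 1)
  else ans
termination_by n.toNat + 1 - 2 ^ k
decreasing_by
  have h1 : (2:Nat) ^ k ≤ n.toNat := by
    have : ((2 ^ k : Nat) : Int) ≤ n := by push_cast; exact _h
    omega
  have h2 : (2:Nat) ^ k < 2 ^ (k + 1) := Nat.pow_lt_pow_right (by norm_num) (Nat.lt_succ_self k)
  omega

def minimumOneBitOperations (n : Int) : Int := pvALoop n 0 0

-- ===== PORT B =====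
-- Source B's 'while n > 0: ans ^= n; n >>= 1'.
def pvBLoop (ans : Int) (n : Int) : Int :=
  if 0 < n then pvBLoop (PySem.Int.bxor ans n) (n >>> (1:Nat)) else ans
termination_by n.toNat
decreasing_by
  have : n >>> (1:Nat) = n / 2 := by simp [Int.shiftRight_eq_div_pow]
  omega

def minimumOneBitOperations_alt (n : Int) : Int := pvBLoop 0 n

-- ===== PRECONDITION & SPEC =====
def Spec_minimumOneBitOperations (n : Int) (out : Int) : Prop := out = minimumOneBitOperations_alt n
instance (n : Int) (out : Int) : Decidable (Spec_minimumOneBitOperations n out) := by unfold Spec_minimumOneBitOperations; infer_instance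

-- ===== CLAIM (what is proved, stated in full; the proofs are below) =====
def Claim_equal_minimumOneBitOperations : Prop := ∀ (n : Int), Dom_minimumOneBitOperations n → Spec_minimumOneBitOperations n (minimumOneBitOperations n)

-- ===== LEMMAS AND PROOFS =====

-- The common mathematical value: the inverse Gray code g m = m ^^^ g (m / 2).
def pvG (m : Nat) : Nat :=
  if m = 0 then 0 else m ^^^ pvG (m / 2)
termination_by m
decreasing_by omega

lemma pvG_zero : pvG 0 = 0 := by rw [pvG]; simp

lemma pvG_eq (m : Nat) : pvG m = m ^^^ pvG (m / 2) := by
  by_cases h : m = 0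
  · subst h; simp [pvG_zero]
  · rw [pvG]; simp [h]

-- cancellation in a 4-way XOR
lemma pv_xor4 (p a o : Nat) : (p ^^^ a) ^^^ (p ^^^ o) = a ^^^ o := by
  rw [Nat.xor_comm p a, Nat.xor_assoc, Nat.xor_xor_cancel_left]

-- 2^m + x has disjoint bits, so the sum is an XOR.
lemma pv_add_eq_xor (m x : Nat) (hx : x < 2 ^ m) : 2 ^ m + x = 2 ^ m ^^^ x := by
  apply Nat.eq_of_testBit_eq
  intro j
  rcases lt_trichotomy j m with h | h | h
  · rw [Nat.testBit_two_pow_add_gt h, Nat.testBit_xor, Nat.testBit_two_pow]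
    simp [Nat.ne_of_gt h]
  · subst h
    rw [Nat.testBit_two_pow_add_eq, Nat.testBit_xor, Nat.testBit_two_pow,
      Nat.testBit_lt_two_pow hx]
    simp
  · have hb : (2 ^ m + x).testBit j = false := by
      apply Nat.testBit_lt_two_pow
      calc 2 ^ m + x < 2 ^ m + 2 ^ m := by omega
        _ = 2 ^ (m + 1) := by ring
        _ ≤ 2 ^ j := Nat.pow_le_pow_right (by norm_num) h
    have hxj : x.testBit j = false := by
      apply Nat.testBit_lt_two_pow
      exact lt_trans hx (Nat.pow_lt_pow_right (by norm_num) h)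
    rw [hb, Nat.testBit_xor, Nat.testBit_two_pow, hxj]
    simp [Nat.ne_of_lt h]

-- XOR with the all-ones mask is subtraction from it (complement).
lemma pv_xor_ones (m : Nat) : ∀ a, a < 2 ^ m → a ^^^ (2 ^ m - 1) = 2 ^ m - 1 - a := by
  induction m with
  | zero => intro a ha; interval_cases a; simp
  | succ m ih =>
    intro a ha
    have hp : (0:Nat) < 2 ^ m := Nat.two_pow_pos m
    have hdouble : (2:Nat) ^ (m + 1) = 2 ^ m + 2 ^ m := by ring
    have hones : (2:Nat) ^ m - 1 < 2 ^ m := by omega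
    have hsplit : (2:Nat) ^ (m + 1) - 1 = 2 ^ m ^^^ (2 ^ m - 1) := by
      rw [← pv_add_eq_xor m _ hones]; omega
    by_cases hc : a < 2 ^ m
    · calc a ^^^ (2 ^ (m + 1) - 1)
          = a ^^^ (2 ^ m ^^^ (2 ^ m - 1)) := by rw [hsplit]
        _ = 2 ^ m ^^^ (a ^^^ (2 ^ m - 1)) := by
            rw [← Nat.xor_assoc, Nat.xor_comm a (2 ^ m), Nat.xor_assoc]
        _ = 2 ^ m ^^^ (2 ^ m - 1 - a) := by rw [ih a hc]
        _ = 2 ^ m + (2 ^ m - 1 - a) := (pv_add_eq_xor m _ (by omega)).symm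
        _ = 2 ^ (m + 1) - 1 - a := by omega
    · have ha' : a - 2 ^ m < 2 ^ m := by omega
      calc a ^^^ (2 ^ (m + 1) - 1)
          = (2 ^ m ^^^ (a - 2 ^ m)) ^^^ (2 ^ m ^^^ (2 ^ m - 1)) := by
            rw [← pv_add_eq_xor m _ ha', hsplit]
            congr 1
            omega
        _ = (a - 2 ^ m) ^^^ (2 ^ m - 1) := pv_xor4 _ _ _
        _ = 2 ^ m - 1 - (a - 2 ^ m) := ih _ ha'
        _ = 2 ^ (m + 1) - 1 - a := by omega

-- The inverse Gray code of an m-bit number is an m-bit number.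
lemma pvG_lt (m : Nat) : ∀ x, x < 2 ^ m → pvG x < 2 ^ m := by
  induction m with
  | zero => intro x hx; interval_cases x; simp [pvG_zero]
  | succ m ih =>
    intro x hx
    rw [pvG_eq]
    have h2 : x / 2 < 2 ^ m := by
      have : (2:Nat) ^ (m + 1) = 2 ^ m * 2 := by ring
      omega
    exact Nat.xor_lt_two_pow hx
      (lt_trans (ih (x / 2) h2) (Nat.pow_lt_pow_right (by norm_num) (Nat.lt_succ_self m)))

-- Setting bit k complements the inverse Gray code within k+1 bits.
lemma pvG_comp (k : Nat) : ∀ x, x < 2 ^ k → pvG (2 ^ k + x) = 2 ^ (k + 1) - 1 - pvG x := by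
  induction k with
  | zero =>
    intro x hx; interval_cases x
    have h1 : pvG 1 = 1 := by rw [pvG_eq]; simp [pvG_zero]
    simp [h1, pvG_zero]
  | succ k ih =>
    intro x hx
    have hp : (0:Nat) < 2 ^ k := Nat.two_pow_pos k
    have hdouble : (2:Nat) ^ (k + 1) = 2 ^ k * 2 := by ring
    have hdouble2 : (2:Nat) ^ (k + 1 + 1) = 2 ^ (k + 1) * 2 := by ring
    have hx2 : x / 2 < 2 ^ k := by omega
    have hdiv : (2 ^ (k + 1) + x) / 2 = 2 ^ k + x / 2 := by
      have h : 2 ^ (k + 1) + x = x + 2 * 2 ^ k := by omega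
      rw [h, Nat.add_mul_div_left _ _ (by norm_num : 0 < 2)]
      omega
    have hgb : pvG (x / 2) < 2 ^ k := pvG_lt k _ hx2
    have hgxlt : pvG x < 2 ^ (k + 1) := pvG_lt (k + 1) x hx
    have e1 : 2 ^ (k + 1) - 1 - pvG (x / 2) = pvG (x / 2) ^^^ (2 ^ (k + 1) - 1) := by
      rw [pv_xor_ones (k + 1) _ (by omega)]
    have e2 : 2 ^ (k + 1 + 1) - 1 - pvG x = pvG x ^^^ (2 ^ (k + 1 + 1) - 1) := by
      rw [pv_xor_ones (k + 1 + 1) _ (by omega)]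
    have hsum : 2 ^ (k + 1) + x = 2 ^ (k + 1) ^^^ x := pv_add_eq_xor _ _ hx
    have hones : (2:Nat) ^ (k + 1 + 1) - 1 = 2 ^ (k + 1) ^^^ (2 ^ (k + 1) - 1) := by
      rw [← pv_add_eq_xor (k + 1) _ (by omega)]
      omega
    calc pvG (2 ^ (k + 1) + x)
        = (2 ^ (k + 1) + x) ^^^ pvG (2 ^ k + x / 2) := by rw [pvG_eq, hdiv]
      _ = (2 ^ (k + 1) ^^^ x) ^^^ (pvG (x / 2) ^^^ (2 ^ (k + 1) - 1)) := by
          rw [ih _ hx2, e1, hsum]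
      _ = (x ^^^ pvG (x / 2)) ^^^ (2 ^ (k + 1) ^^^ (2 ^ (k + 1) - 1)) := by ac_rfl
      _ = pvG x ^^^ (2 ^ (k + 1 + 1) - 1) := by rw [← pvG_eq, hones]
      _ = 2 ^ (k + 1 + 1) - 1 - pvG x := e2.symm

-- B's loop computes ans ^^^ pvG m on nonnegative inputs.
lemma pvBLoop_eq (m : Nat) : ∀ a : Nat, pvBLoop (a : Int) (m : Int) = ((a ^^^ pvG m : Nat) : Int) := by
  induction m using Nat.strong_induction_on with
  | _ m ih =>
    intro a
    by_cases h : m = 0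
    · subst h
      rw [pvBLoop]
      simp [pvG_zero]
    · rw [pvBLoop]
      have hpos : (0:Int) < (m:Int) := by exact_mod_cast Nat.pos_of_ne_zero h
      rw [if_pos hpos, PySem.Int.bxor_natCast]
      have hshift : ((m:Int) >>> (1:Nat)) = ((m / 2 : Nat) : Int) := by
        rw [Int.shiftRight_eq_div_pow]
        have h21 : ((2 ^ 1 : Nat) : Int) = 2 := by norm_num
        rw [h21]
        omega
      rw [hshift, ih (m / 2) (by omega) (a ^^^ m)]
      rw [Nat.xor_assoc, ← pvG_eq]

-- bridge: the Int-literal power is the cast of the Nat power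
lemma pv_pow_cast (k : Nat) : (2:Int) ^ k = ((2 ^ k : Nat) : Int) := by push_cast; ring

-- A's loop invariant: with ans = pvG (m % 2^k) it computes pvG m; the fuel f bounds the bits left.
lemma pvALoop_inv (m : Nat) : ∀ f k : Nat, m < 2 ^ (k + f) →
    pvALoop (m : Int) ((pvG (m % 2 ^ k) : Nat) : Int) k = ((pvG m : Nat) : Int) := by
  intro f
  induction f with
  | zero =>
    intro k hk
    have hk0 : m < 2 ^ k := by simpa using hk
    rw [pvALoop, dif_neg (by rw [pv_pow_cast]; exact not_le.mpr (by exact_mod_cast hk0)),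
      Nat.mod_eq_of_lt hk0]
  | succ f ih =>
    intro k hk
    by_cases h : (2:Int) ^ k ≤ (m : Int)
    · rw [pvALoop, dif_pos h]
      have hband : PySem.Int.band (m : Int) ((2:Int) ^ k) = (((m &&& 2 ^ k : Nat)) : Int) := by
        rw [pv_pow_cast, PySem.Int.band_natCast]
      have hmod : m % 2 ^ (k + 1) = m % 2 ^ k + 2 ^ k * (m / 2 ^ k % 2) := by
        have h2 : (2:Nat) ^ (k + 1) = 2 ^ k * 2 := by ring
        rw [h2, Nat.mod_mul]
      have hmlt : m % 2 ^ k < 2 ^ k := Nat.mod_lt _ (Nat.two_pow_pos k)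
      have hd2 : (2:Nat) ^ (k + 1) = 2 ^ k + 2 ^ k := by ring
      have htb : m.testBit k = decide (m / 2 ^ k % 2 = 1) := Nat.testBit_eq_decide_div_mod_eq
      have hstep :
          (if PySem.Int.band (m : Int) ((2:Int) ^ k) ≠ 0 then
              (2:Int) ^ (k + 1) - 1 - ((pvG (m % 2 ^ k) : Nat) : Int)
            else ((pvG (m % 2 ^ k) : Nat) : Int))
          = ((pvG (m % 2 ^ (k + 1)) : Nat) : Int) := by
        rw [hband, Nat.and_two_pow]
        by_cases hb : m.testBit k
        · rw [if_pos (by rw [hb]; simp)]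
          have hb1 : m / 2 ^ k % 2 = 1 := by rw [hb] at htb; simpa using htb.symm
          have hmodt : m % 2 ^ (k + 1) = 2 ^ k + m % 2 ^ k := by rw [hmod, hb1]; ring
          rw [hmodt, pvG_comp k _ hmlt]
          have hglt : pvG (m % 2 ^ k) < 2 ^ k := pvG_lt k _ hmlt
          have hd : (2:Nat) ^ (k + 1) = 2 ^ k + 2 ^ k := by ring
          rw [show 2 ^ (k + 1) - 1 - pvG (m % 2 ^ k) = 2 ^ (k + 1) - (1 + pvG (m % 2 ^ k)) by omega,
            Nat.cast_sub (by omega), pv_pow_cast (k + 1)]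
          push_cast
          ring
        · rw [if_neg (by rw [Bool.of_not_eq_true hb]; simp)]
          have hb0 : m / 2 ^ k % 2 = 0 := by
            rw [Bool.of_not_eq_true hb] at htb
            have h1 : ¬ (m / 2 ^ k % 2 = 1) := by simpa using htb.symm
            omega
          have hmodf : m % 2 ^ (k + 1) = m % 2 ^ k := by rw [hmod, hb0]; ring
          rw [hmodf]
      rw [hstep]
      exact ih (k + 1) (by rw [show k + 1 + f = k + (f + 1) by omega]; exact hk)
    · rw [pvALoop, dif_neg h]
      rw [pv_pow_cast] at h
      have hlt : m < 2 ^ k := by exact_mod_cast not_le.mp h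
      rw [Nat.mod_eq_of_lt hlt]

-- ===== VERDICT (by name: the statement is the Claim_ definition above) =====
theorem minimumOneBitOperations_spec : Claim_equal_minimumOneBitOperations := by
  intro n _
  unfold Spec_minimumOneBitOperations minimumOneBitOperations minimumOneBitOperations_alt
  by_cases hn : 0 ≤ n
  · obtain ⟨m, rfl⟩ := Int.eq_ofNat_of_zero_le hn
    have hA : pvALoop (m : Int) 0 0 = ((pvG m : Nat) : Int) := by
      have := pvALoop_inv m m 0 (by simpa using Nat.lt_two_pow_self)
      simpa [Nat.mod_one, pvG_zero] using this
    have hB : pvBLoop 0 (m : Int) = ((pvG m : Nat) : Int) := by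
      simpa using pvBLoop_eq m 0
    rw [hA, hB]
  · rw [pvALoop, pvBLoop, dif_neg (by simp; omega), if_neg (by omega)]
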